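-- pv_equiv track=rewrite | github.com/todormanev956/love2late | Project/Homemade/pipeline.py | list_score
-- ===== SOURCE A (Python) =====
-- import string
--
-- def list_score(text,word_list):
--     for p in string.punctuation:
--         text = text.replace(p,' ')
--     words = [ word for word in text.lower().split() if len(word) > 2 ]
--     score = 0
--     for word in words:
--         if word in word_list:
--             score +=1
--     return score
-- ===== SOURCE B (Python) =====
-- import string
--
-- def list_score(text, word_list):
--     # Single streaming pass over the characters: build each word incrementally,
--     # score it at every word boundary; membership via a hash set.
--     word_set = set(word_list)
--     punct = set(string.punctuation)
--     score = 0
--     buf = ''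
--     for c in text:
--         if c in punct or c.isspace():
--             if len(buf) > 2 and buf in word_set:
--                 score += 1
--             buf = ''
--         else:
--             buf += c.lower()
--     if len(buf) > 2 and buf in word_set:
--         score += 1
--     return score
-- ===== Notes on version B (the rewrite author's own statement) =====
-- stated objective: alternative
-- what changed: Replaces A's staged pipeline (32 full-text replace passes, then lower+split into a word list, then a counting loop with list membership) by a single streaming character-level state machine that builds each word in a buffer and scores it at every word boundary, testing membership in a hash set built once from word_list.
import Mathlib
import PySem

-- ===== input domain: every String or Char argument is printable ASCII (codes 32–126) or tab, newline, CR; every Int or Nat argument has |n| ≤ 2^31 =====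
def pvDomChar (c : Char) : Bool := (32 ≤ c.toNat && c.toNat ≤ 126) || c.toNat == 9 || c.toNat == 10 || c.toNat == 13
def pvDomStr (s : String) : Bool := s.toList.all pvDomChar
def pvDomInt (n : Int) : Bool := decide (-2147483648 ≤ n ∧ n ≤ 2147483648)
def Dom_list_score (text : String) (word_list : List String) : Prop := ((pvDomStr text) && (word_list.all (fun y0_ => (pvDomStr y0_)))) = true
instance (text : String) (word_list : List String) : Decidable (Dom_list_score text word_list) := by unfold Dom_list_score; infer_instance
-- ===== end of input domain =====

-- B replaces A's staged pipeline (32 replace passes, lower+split, then a counting loop)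
-- by a single streaming character-level state machine that scores each word at its
-- boundary, with membership tested in a set built once from word_list (alternative).

-- string.punctuation as a list of characters (shared constant of both ports)
def punctChars : List Char :=
  ['!', '"', '#', '$', '%', '&', '\'', '(', ')', '*', '+', ',', '-', '.', '/',
   ':', ';', '<', '=', '>', '?', '@', '[', '\\', ']', '^', '_', '`', '{', '|', '}', '~']

-- ===== PORT A =====
-- for p in string.punctuation: text = text.replace(p,' ');
-- words = [w for w in text.lower().split() if len(w) > 2];
-- score = 0; for word in words: if word in word_list: score += 1
def list_score (text : String) (word_list : List String) : Int :=
  let text := punctChars.foldl (fun t p => PySem.Str.replace t (String.ofList [p]) " ") text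
  let words := (PySem.Str.split₀ (PySem.Str.lower text)).filter
    (fun w => decide (2 < PySem.Str.len w))
  words.foldl (fun score word => if word_list.contains word then score + 1 else score) 0

-- ===== PORT B =====
-- word_set = set(word_list); punct = set(string.punctuation); score = 0; buf = '';
-- for c in text: if c in punct or c.isspace(): (flush: if len(buf) > 2 and buf in word_set: score += 1; buf = '')
--                else: buf += c.lower()
-- final flush; return score.  (c.isspace() = PySem.Chars.isspace, exact.)
def list_score_alt (text : String) (word_list : List String) : Int :=
  let wordSet : PySem.Set String := PySem.Set.ofList word_list
  let punctSet : PySem.Set Char := PySem.Set.ofList punctChars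
  let flush := fun (score : Int) (buf : List Char) =>
    if decide (2 < buf.length) && PySem.Set.contains wordSet (String.ofList buf) then score + 1 else score
  let fin := text.toList.foldl
    (fun (st : Int × List Char) c =>
      if PySem.Set.contains punctSet c || PySem.Chars.isspace c then (flush st.1 st.2, ([] : List Char))
      else (st.1, st.2 ++ [PySem.Chars.lowerChar c]))
    (0, ([] : List Char))
  flush fin.1 fin.2

-- ===== PRECONDITION & SPEC =====
def Spec_list_score (text : String) (word_list : List String) (out : Int) : Prop := out = list_score_alt text word_list
instance (text : String) (word_list : List String) (out : Int) : Decidable (Spec_list_score text word_list out) := by unfold Spec_list_score; infer_instance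

-- ===== CLAIM =====
def Claim_equal_list_score : Prop := ∀ (text : String) (word_list : List String), Dom_list_score text word_list → Spec_list_score text word_list (list_score text word_list)

-- ===== LEMMAS AND PROOFS =====

-- the per-character normalisation both programs effectively apply: punctuation → ' ', then lowercase
def pvTl (c : Char) : Char := PySem.Chars.lowerChar (if punctChars.contains c then ' ' else c)

-- single-character replace is a character map
theorem replace_go_single (p q : Char) :
    ∀ (fuel : Nat) (l acc : List Char), l.length ≤ fuel →
      PySem.Chars.replace.go [p] [q] fuel l acc =
        acc.reverse ++ l.map (fun c => if c == p then q else c) := by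
  intro fuel
  induction fuel with
  | zero =>
    intro l acc h
    have : l = [] := List.length_eq_zero_iff.mp (Nat.le_zero.mp h)
    subst this; simp [PySem.Chars.replace.go]
  | succ n ih =>
    intro l acc h
    cases l with
    | nil => simp [PySem.Chars.replace.go]
    | cons c t =>
      simp only [PySem.Chars.replace.go, List.isPrefixOf]
      by_cases hc : p = c
      · subst hc
        rw [if_pos (by simp)]
        rw [ih _ _ (by simpa using Nat.le_of_succ_le_succ h)]
        simp
      · rw [if_neg (by simp [hc])]
        rw [ih _ _ (by simpa using Nat.le_of_succ_le_succ h)]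
        simp [Ne.symm hc]

theorem replace_single (p q : Char) (l : List Char) :
    PySem.Chars.replace l [p] [q] = l.map (fun c => if c == p then q else c) := by
  have h := replace_go_single p q l.length l [] (le_refl _)
  simpa [PySem.Chars.replace] using h

-- folding single-char replaces over a list of non-space characters is one table-driven map
theorem foldl_replace_map (ps : List Char) (hsp : ' ' ∉ ps) :
    ∀ l : List Char,
      ps.foldl (fun t c => t.map (fun d => if d == c then ' ' else d)) l =
        l.map (fun c => if ps.contains c then ' ' else c) := by
  induction ps with
  | nil => intro l; simp
  | cons p ps ih =>
    intro l
    have hsp' : ' ' ∉ ps := fun h => hsp (List.mem_cons_of_mem _ h)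
    have hspp : p ≠ ' ' := fun h => hsp (h ▸ List.mem_cons_self)
    simp only [List.foldl_cons, ih hsp', List.map_map]
    apply List.map_congr_left
    intro c _
    by_cases hc : c = p
    · subst hc
      simp [Function.comp, hsp']
    · simp [Function.comp, hc]

-- the string-level replace loop of port A, moved to the character-list side
theorem foldl_str_replace (ps : List Char) :
    ∀ t : String,
      (ps.foldl (fun t p => PySem.Str.replace t (String.ofList [p]) " ") t).toList =
        ps.foldl (fun l p => l.map (fun d => if d == p then ' ' else d)) t.toList := by
  induction ps with
  | nil => intro t; rfl
  | cons p ps ih =>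
    intro t
    simp only [List.foldl_cons, ih]
    congr 1
    rw [PySem.Str.toList_replace]
    simp only [String.toList_ofList]
    have : (" ").toList = [' '] := rfl
    rw [this, replace_single p ' ' t.toList]

-- split₀.go only prepends its accumulator (reversed) to the result
theorem split_go_acc :
    ∀ (l cur acc : List Char) (accs : List (List Char)),
      PySem.Chars.split₀.go l cur (acc :: accs) =
        (acc :: accs).reverse ++ PySem.Chars.split₀.go l cur [] := by
  intro l
  induction l with
  | nil =>
    intro cur acc accs
    by_cases hc : cur.isEmpty
    · simp [PySem.Chars.split₀.go, hc]
    · simp [PySem.Chars.split₀.go, hc]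
  | cons c rest ih =>
    intro cur acc accs
    by_cases hs : PySem.Chars.isspace c
    · by_cases hc : cur.isEmpty
      · simp [PySem.Chars.split₀.go, hs, hc, ih]
      · simp [PySem.Chars.split₀.go, hs, hc, ih]
    · simp [PySem.Chars.split₀.go, hs, ih]

-- the streaming state machine counts exactly the split₀ words satisfying p
theorem machine_count (p : List Char → Bool) (hp : p [] = false) :
    ∀ (l b : List Char) (score : Int),
      (let fin := l.foldl
          (fun (st : Int × List Char) c =>
            if PySem.Chars.isspace c then ((if p st.2 then st.1 + 1 else st.1), ([] : List Char))
            else (st.1, st.2 ++ [c]))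
          (score, b)
        if p fin.2 then fin.1 + 1 else fin.1)
      = score + ((PySem.Chars.split₀.go l b.reverse []).countP p : Int) := by
  intro l
  induction l with
  | nil =>
    intro b score
    cases b with
    | nil => simp [PySem.Chars.split₀.go, hp]
    | cons x xs =>
      simp only [List.foldl_nil, PySem.Chars.split₀.go]
      have : ((x :: xs).reverse).isEmpty = false := by simp
      rw [this]
      simp [List.countP_cons]
      by_cases hpb : p (x :: xs) <;> simp [hpb]
  | cons c rest ih =>
    intro b score
    by_cases hs : PySem.Chars.isspace c
    · simp only [List.foldl_cons, hs, if_pos]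
      rw [ih]
      simp only [PySem.Chars.split₀.go, hs, if_pos]
      cases b with
      | nil => simp [hp]
      | cons x xs =>
        have hne : ((x :: xs).reverse).isEmpty = false := by simp
        rw [hne]
        simp only [List.reverse_nil] at *
        rw [split_go_acc]
        simp [List.countP_cons]
        by_cases hpb : p (x :: xs) <;> simp [hpb] <;> omega
    · simp only [List.foldl_cons, hs, if_neg, Bool.false_eq_true, not_false_iff]
      rw [ih]
      simp [PySem.Chars.split₀.go, hs]

-- lowercasing an uppercase letter adds 32 to the code point
theorem lowerChar_upper_toNat (c : Char) (hu : PySem.Chars.isupper c = true) :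
    (PySem.Chars.lowerChar c).toNat = c.toNat + 32 := by
  have hb : 65 ≤ c.toNat ∧ c.toNat ≤ 90 := by
    simp [PySem.Chars.isupper, Char.le_def] at hu; exact hu
  have hv : (c.toNat + 32).isValidChar := by unfold Nat.isValidChar; omega
  simp [PySem.Chars.lowerChar, hu, Char.ofNat, hv, Char.ofNatAux]
  omega

-- boundary test on the raw character equals whitespace test on the normalised character
theorem boundary_eq (c : Char) :
    (punctChars.contains c || PySem.Chars.isspace c) = PySem.Chars.isspace (pvTl c) := by
  by_cases hp : punctChars.contains c = true
  · simp only [pvTl, hp, if_pos, Bool.true_or]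
    decide
  · have hp' : punctChars.contains c = false := by simpa using hp
    simp only [pvTl, hp', Bool.false_eq_true, if_neg, not_false_iff, Bool.false_or]
    by_cases hu : PySem.Chars.isupper c = true
    · have hb : 65 ≤ c.toNat ∧ c.toNat ≤ 90 := by
        simp [PySem.Chars.isupper, Char.le_def] at hu; exact hu
      have h1 : PySem.Chars.isspace c = false := by
        simp [PySem.Chars.isspace]; omega
      have h2 : PySem.Chars.isspace (PySem.Chars.lowerChar c) = false := by
        simp [PySem.Chars.isspace, lowerChar_upper_toNat c hu]; omega
      rw [h1, h2]
    · have hu' : PySem.Chars.isupper c = false := by simpa using hu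
      simp [PySem.Chars.lowerChar, hu']

-- set membership built from word_list is list membership
theorem set_contains_eq {α : Type} [BEq α] [LawfulBEq α] (wl : List α) (x : α) :
    PySem.Set.contains (PySem.Set.ofList wl) x = wl.contains x := by
  simp only [PySem.Set.contains]
  rw [Bool.eq_iff_iff]
  simp only [List.contains_iff_mem]
  exact PySem.Set.mem_ofList wl x

-- ===== VERDICT =====
theorem list_score_spec : Claim_equal_list_score := by
  intro text word_list _
  unfold Spec_list_score list_score list_score_alt
  have hsp : ' ' ∉ punctChars := by decide
  have htext :
      (punctChars.foldl (fun t p => PySem.Str.replace t (String.ofList [p]) " ") text) =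
        String.ofList (text.toList.map (fun c => if punctChars.contains c then ' ' else c)) := by
    apply String.toList_inj.mp
    rw [foldl_str_replace, foldl_replace_map punctChars hsp, String.toList_ofList]
  rw [htext]
  rw [PySem.List.foldl_if_add_one, List.countP_filter, zero_add]
  -- A side down to the character level
  have hAlist :
      (PySem.Str.lower (String.ofList
        (text.toList.map (fun c => if punctChars.contains c then ' ' else c)))).toList =
        text.toList.map pvTl := by
    rw [PySem.Str.toList_lower, String.toList_ofList]
    simp [PySem.Chars.lower, List.map_map, pvTl, Function.comp]
  rw [show PySem.Str.split₀ = fun s => List.map String.ofList (PySem.Chars.split₀ s.toList) from rfl]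
  simp only [hAlist, List.countP_map]
  -- B side: replace set membership by list membership, then apply the machine lemma
  simp only [set_contains_eq]
  have hstep :
      (fun (st : Int × List Char) c =>
        if (punctChars.contains c || PySem.Chars.isspace c) = true then
          (if (decide (2 < st.2.length) && word_list.contains (String.ofList st.2)) = true then st.1 + 1 else st.1,
            ([] : List Char))
        else (st.1, st.2 ++ [PySem.Chars.lowerChar c])) =
      fun (st : Int × List Char) c =>
        (fun (st : Int × List Char) d =>
          if PySem.Chars.isspace d = true then
            (if (decide (2 < st.2.length) && word_list.contains (String.ofList st.2)) = true then st.1 + 1 else st.1,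
              ([] : List Char))
          else (st.1, st.2 ++ [d])) st (pvTl c) := by
    funext st c
    simp only [← boundary_eq c]
    by_cases hpc : c ∈ punctChars
    · simp [hpc]
    · simp [pvTl, hpc]
  rw [hstep]
  rw [show List.foldl
        (fun (st : Int × List Char) c =>
          (fun (st : Int × List Char) d =>
            if PySem.Chars.isspace d = true then
              (if (decide (2 < st.2.length) && word_list.contains (String.ofList st.2)) = true then st.1 + 1 else st.1,
                ([] : List Char))
            else (st.1, st.2 ++ [d])) st (pvTl c))
        ((0 : Int), ([] : List Char)) text.toList
      = List.foldl
          (fun (st : Int × List Char) d =>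
            if PySem.Chars.isspace d = true then
              (if (decide (2 < st.2.length) && word_list.contains (String.ofList st.2)) = true then st.1 + 1 else st.1,
                ([] : List Char))
            else (st.1, st.2 ++ [d]))
          ((0 : Int), ([] : List Char)) (List.map pvTl text.toList)
    by rw [List.foldl_map]]
  have hm := machine_count
      (fun b => decide (2 < b.length) && word_list.contains (String.ofList b))
      (by simp) (text.toList.map pvTl) [] 0
  simp only [List.reverse_nil] at hm
  rw [hm, zero_add]
  rw [show PySem.Chars.split₀ (List.map pvTl text.toList) =
        PySem.Chars.split₀.go (List.map pvTl text.toList) [] [] from rfl]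
  rw [Nat.cast_inj]
  apply List.countP_congr
  intro w _
  simp [Function.comp, PySem.Str.len_eq, Bool.and_comm]
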